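-- pv_equiv track=rewrite | github.com/Amryu/Entropia-Nexus | client/updater.py | merge_changelogs
-- ===== SOURCE A (Python) =====
-- def merge_changelogs(bundled: list[dict], remote: list[dict]) -> list[dict]:
--     """Merge bundled and remote changelogs, deduplicated by version, sorted newest first."""
--     seen: dict[str, dict] = {}
--     for entry in remote + bundled:
--         v = entry.get("version", "")
--         if v and v not in seen:
--             seen[v] = entry
--     result = list(seen.values())
--     result.sort(key=lambda e: [int(p) for p in e.get("version", "0").split(".")],
--                 reverse=True)
--     return result
-- ===== SOURCE B (Python) =====
-- def merge_changelogs(bundled: list[dict], remote: list[dict]) -> list[dict]: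
--     """Merge bundled and remote changelogs, deduplicated by version, sorted newest first."""
--     def key(e):
--         return [int(p) for p in e.get("version", "0").split(".")]
--     entries = [e for e in remote + bundled if e.get("version", "")]
--     result = []
--     while entries:
--         best = max(entries, key=key)        # first maximal entry = remote-priority pick
--         result.append(best)
--         bv = best.get("version", "")
--         entries = [e for e in entries if e.get("version", "") != bv]
--     return result
-- ===== Notes on version B (the rewrite author's own statement) =====
-- stated objective: alternative
-- what changed: A dedups into an insertion-ordered dict keyed by version and then sorts the dict's values descending; B never builds a dict and never sorts: after dropping version-less entries it runs a selection loop that repeatedly takes max(entries, key=version tuple) (the first maximal entry, so remote priority is kept) and filters out every entry with that version, emitting results already in order.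
import Mathlib
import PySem

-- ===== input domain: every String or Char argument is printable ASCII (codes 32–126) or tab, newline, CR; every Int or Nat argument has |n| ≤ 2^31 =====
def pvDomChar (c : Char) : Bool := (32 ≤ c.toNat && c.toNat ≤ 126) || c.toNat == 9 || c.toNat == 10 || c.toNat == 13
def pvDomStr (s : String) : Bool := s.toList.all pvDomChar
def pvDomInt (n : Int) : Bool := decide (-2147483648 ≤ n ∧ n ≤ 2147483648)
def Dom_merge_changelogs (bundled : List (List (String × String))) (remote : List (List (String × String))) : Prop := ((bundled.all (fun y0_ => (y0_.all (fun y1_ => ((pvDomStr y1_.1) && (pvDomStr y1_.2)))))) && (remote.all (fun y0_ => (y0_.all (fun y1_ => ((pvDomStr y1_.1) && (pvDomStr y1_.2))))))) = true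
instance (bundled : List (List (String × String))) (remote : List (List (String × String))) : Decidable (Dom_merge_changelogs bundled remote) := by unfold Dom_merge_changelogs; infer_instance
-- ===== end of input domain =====

-- B replaces A's dedup-dict-then-sort by selection with integrated dedup: repeatedly pick the
-- first entry with the maximal version key and drop all entries sharing its version; no dict, no sort.

-- shared helpers: entry.get("version", dflt) and the sort key [int(p) for p in v.split(".")]
def pvGetVer (e : List (String × String)) (dflt : String) : String :=
  (PySem.Dict.mk e).getD "version" dflt

-- int(p) is PySem.Int.ofChars?; the `.getD 0` arm is unreachable under Pre_ (int(p) never raises there)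
def pvKey (e : List (String × String)) : List Int :=
  (PySem.Chars.splitOn (pvGetVer e "0").toList ".".toList).map (fun p => (PySem.Int.ofChars? p).getD 0)

-- ===== PORT A =====
def merge_changelogs (bundled : List (List (String × String))) (remote : List (List (String × String))) : List (List (String × String)) :=
  PySem.List.sorted
    ((remote ++ bundled).foldl
      (fun seen entry =>
        if pvGetVer entry "" ≠ "" ∧ seen.contains (pvGetVer entry "") = false
        then seen.insert (pvGetVer entry "") entry else seen)
      (PySem.Dict.empty : PySem.Dict String (List (String × String)))).values
    pvKey true

-- ===== PORT B =====
-- one step of max(entries, key=key): the running max absorbs the head of the list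
lemma pvMax_cons_cons (c x : List (String × String)) (t : List (List (String × String))) :
    PySem.List.max? (c :: x :: t) pvKey
      = PySem.List.max? ((if pvKey c < pvKey x then x else c) :: t) pvKey := by
  by_cases hx : pvKey c < pvKey x <;>
    simp [PySem.List.max?, hx]

-- max(entries, key=key) is an element of entries
lemma pvMax_mem (t : List (List (String × String))) :
    ∀ c r, PySem.List.max? (c :: t) pvKey = some r → r = c ∨ r ∈ t := by
  induction t with
  | nil =>
    intro c r h
    simp [PySem.List.max?] at h
    exact Or.inl h.symm
  | cons x t ih =>
    intro c r h
    rw [pvMax_cons_cons] at h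
    rcases ih _ r h with h1 | h1
    · by_cases hx : pvKey c < pvKey x
      · rw [if_pos hx] at h1
        exact Or.inr (h1 ▸ List.mem_cons_self ..)
      · rw [if_neg hx] at h1
        exact Or.inl h1
    · exact Or.inr (List.mem_cons_of_mem _ h1)

-- termination helper for B's while-loop: the filter removes at least the selected entry
lemma pvSelDec (entries : List (List (String × String))) (best : List (String × String))
    (hm : PySem.List.max? entries pvKey = some best) :
    (entries.filter (fun e => pvGetVer e "" ≠ pvGetVer best "")).length < entries.length := by
  cases entries with
  | nil => simp [PySem.List.max?] at hm
  | cons x t =>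
    have hmem : best ∈ x :: t := by
      rcases pvMax_mem t x best hm with h | h
      · exact h ▸ List.mem_cons_self ..
      · exact List.mem_cons_of_mem _ h
    exact List.length_filter_lt_length_iff_exists.mpr ⟨best, hmem, by simp⟩

-- technical: the well-founded compiler rewrites the recursive argument through List.attach
lemma pvLenAttachFilter (l : List (List (String × String))) (p : List (String × String) → Bool) :
    (List.filter (fun x => p x.1) l.attach).length = (l.filter p).length := by
  rw [← List.countP_eq_length_filter, ← List.countP_eq_length_filter, List.countP_attach]

-- the while-loop of Source B: best = max(entries, key=key); emit it; drop its version; repeat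
def pvSelLoop (entries : List (List (String × String))) : List (List (String × String)) :=
  if hm : (PySem.List.max? entries pvKey).isSome then
    (PySem.List.max? entries pvKey).get hm ::
      pvSelLoop (entries.filter (fun e =>
        pvGetVer e "" ≠ pvGetVer ((PySem.List.max? entries pvKey).get hm) ""))
  else []
termination_by entries.length
decreasing_by
  rw [List.length_unattach]
  exact Nat.lt_of_le_of_lt
    (Nat.le_of_eq (pvLenAttachFilter entries
      (fun e => decide (pvGetVer e "" ≠ pvGetVer ((PySem.List.max? entries pvKey).get hm) ""))))
    (pvSelDec entries _ (Option.some_get hm).symm)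

def merge_changelogs_alt (bundled : List (List (String × String))) (remote : List (List (String × String))) : List (List (String × String)) :=
  pvSelLoop ((remote ++ bundled).filter (fun e => pvGetVer e "" ≠ ""))

-- ===== PRECONDITION & SPEC =====
-- Pre_ excludes exactly the inputs where Python A raises ValueError: some entry carries a
-- nonempty version string one of whose dot-separated parts int() cannot parse.
def Pre_merge_changelogs (bundled : List (List (String × String))) (remote : List (List (String × String))) : Prop :=
  ∀ e ∈ remote ++ bundled, pvGetVer e "" ≠ "" →
    ∀ p ∈ PySem.Chars.splitOn (pvGetVer e "").toList ".".toList, (PySem.Int.ofChars? p).isSome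
instance (bundled : List (List (String × String))) (remote : List (List (String × String))) : Decidable (Pre_merge_changelogs bundled remote) := by unfold Pre_merge_changelogs; infer_instance

def pvWitness_merge_changelogs : (List (List (String × String))) × (List (List (String × String))) :=
  ([[("version", "1.0"), ("notes", "old")]], [[("version", "2")], [("version", "1.0"), ("notes", "new")]])

def Spec_merge_changelogs (bundled : List (List (String × String))) (remote : List (List (String × String))) (out : List (List (String × String))) : Prop := out = merge_changelogs_alt bundled remote
instance (bundled : List (List (String × String))) (remote : List (List (String × String))) (out : List (List (String × String))) : Decidable (Spec_merge_changelogs bundled remote out) := by unfold Spec_merge_changelogs; infer_instance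

-- ===== CLAIM (what is proved, stated in full; the proofs are below) =====
def Claim_equal_merge_changelogs : Prop := ∀ (bundled : List (List (String × String))) (remote : List (List (String × String))), Dom_merge_changelogs bundled remote → Pre_merge_changelogs bundled remote → Spec_merge_changelogs bundled remote (merge_changelogs bundled remote)

-- ===== LEMMAS AND PROOFS =====

-- keep-first dedup by version string, with an explicit seen-set (characterises A's dict loop)
def pvDed (l : List (List (String × String))) (seen : PySem.Set String) : List (List (String × String)) :=
  match l with
  | [] => []
  | e :: t =>
    if PySem.Set.contains seen (pvGetVer e "") then pvDed t seen
    else e :: pvDed t (PySem.Set.add seen (pvGetVer e ""))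

-- the seen-set after a prefix has been processed
def pvVset (l : List (List (String × String))) (seen : PySem.Set String) : PySem.Set String :=
  match l with
  | [] => seen
  | e :: t => pvVset t (PySem.Set.add seen (pvGetVer e ""))

-- the comparison of the stable reverse insertion sort
def pvBefore (a b : List (String × String)) : Bool := decide (pvKey b < pvKey a)

lemma pvGetVer_eq (e : List (String × String)) (h : pvGetVer e "" ≠ "") :
    pvGetVer e "0" = pvGetVer e "" := by
  unfold pvGetVer at h ⊢
  rw [PySem.Dict.getD_eq_get?_getD] at h
  rw [PySem.Dict.getD_eq_get?_getD, PySem.Dict.getD_eq_get?_getD]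
  cases hh : (PySem.Dict.mk e).get? "version" with
  | none => rw [hh] at h; simp at h
  | some v => rfl

lemma pvKey_congr (a b : List (String × String)) (ha : pvGetVer a "" ≠ "")
    (hv : pvGetVer a "" = pvGetVer b "") (hb : pvGetVer b "" ≠ "") : pvKey a = pvKey b := by
  unfold pvKey
  rw [pvGetVer_eq a ha, pvGetVer_eq b hb, hv]

lemma pvContains_of_mem (s : PySem.Set String) (v : String) (h : v ∈ s) :
    PySem.Set.contains s v = true := by
  simpa [PySem.Set.contains] using List.contains_iff_mem.mpr h

lemma pvContains_of_not_mem (s : PySem.Set String) (v : String) (h : v ∉ s) :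
    PySem.Set.contains s v = false := by
  simp [PySem.Set.contains]
  exact h

lemma pvAdd_of_mem (s : PySem.Set String) (v : String) (h : v ∈ s) :
    PySem.Set.add s v = s := by
  simp [PySem.Set.add, h]

lemma pvAdd_of_not_mem (s : PySem.Set String) (v : String) (h : v ∉ s) :
    PySem.Set.add s v = s ++ [v] := by
  simp [PySem.Set.add, h]

lemma pvDed_cons_mem (e : List (String × String)) (t : List (List (String × String)))
    (seen : PySem.Set String) (h : pvGetVer e "" ∈ seen) :
    pvDed (e :: t) seen = pvDed t seen := by
  rw [pvDed, if_pos (by rw [pvContains_of_mem _ _ h])]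

lemma pvDed_cons_not_mem (e : List (String × String)) (t : List (List (String × String)))
    (seen : PySem.Set String) (h : pvGetVer e "" ∉ seen) :
    pvDed (e :: t) seen = e :: pvDed t (PySem.Set.add seen (pvGetVer e "")) := by
  rw [pvDed, if_neg (by rw [pvContains_of_not_mem _ _ h]; simp)]

lemma pvInsertBy_cons_true (p : List (String × String) → List (String × String) → Bool)
    (x y : List (String × String)) (t : List (List (String × String))) (h : p x y = true) :
    PySem.List.insertBy p x (y :: t) = x :: y :: t := by
  simp [PySem.List.insertBy, h]

lemma pvInsertBy_cons_false (p : List (String × String) → List (String × String) → Bool)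
    (x y : List (String × String)) (t : List (List (String × String))) (h : p x y = false) :
    PySem.List.insertBy p x (y :: t) = y :: PySem.List.insertBy p x t := by
  simp [PySem.List.insertBy, h]

lemma mem_pvVset (l : List (List (String × String))) (seen : PySem.Set String) (v : String) :
    v ∈ pvVset l seen ↔ v ∈ seen ∨ v ∈ l.map (fun e => pvGetVer e "") := by
  induction l generalizing seen with
  | nil => simp [pvVset]
  | cons e t ih => simp [pvVset, ih, PySem.Set.mem_add]; tauto

lemma pvDed_append (a b : List (List (String × String))) (seen : PySem.Set String) :
    pvDed (a ++ b) seen = pvDed a seen ++ pvDed b (pvVset a seen) := by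
  induction a generalizing seen with
  | nil => simp [pvDed, pvVset]
  | cons e t ih =>
    by_cases hc : pvGetVer e "" ∈ seen
    · rw [List.cons_append, pvDed_cons_mem _ _ _ hc, pvDed_cons_mem _ _ _ hc, ih, pvVset,
        pvAdd_of_mem _ _ hc]
    · rw [List.cons_append, pvDed_cons_not_mem _ _ _ hc, pvDed_cons_not_mem _ _ _ hc, ih, pvVset,
        List.cons_append]

lemma pvDed_congr (l : List (List (String × String))) (s1 s2 : PySem.Set String)
    (h : ∀ e ∈ l, (pvGetVer e "" ∈ s1 ↔ pvGetVer e "" ∈ s2)) : pvDed l s1 = pvDed l s2 := by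
  induction l generalizing s1 s2 with
  | nil => rfl
  | cons e t ih =>
    have he := h e (List.mem_cons_self ..)
    by_cases h1 : pvGetVer e "" ∈ s1
    · rw [pvDed_cons_mem _ _ _ h1, pvDed_cons_mem _ _ _ (he.mp h1)]
      exact ih _ _ (fun e' he' => h e' (List.mem_cons_of_mem _ he'))
    · have h2 : pvGetVer e "" ∉ s2 := fun hx => h1 (he.mpr hx)
      rw [pvDed_cons_not_mem _ _ _ h1, pvDed_cons_not_mem _ _ _ h2]
      congr 1
      exact ih _ _ (fun e' he' => by
        simp [PySem.Set.mem_add, h e' (List.mem_cons_of_mem _ he')])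

lemma mem_pvDed (l : List (List (String × String))) (seen : PySem.Set String)
    (y : List (String × String)) : y ∈ pvDed l seen → y ∈ l := by
  induction l generalizing seen with
  | nil => intro hy; simp [pvDed] at hy
  | cons e t ih =>
    intro hy
    by_cases hc : pvGetVer e "" ∈ seen
    · rw [pvDed_cons_mem _ _ _ hc] at hy
      exact List.mem_cons_of_mem _ (ih _ hy)
    · rw [pvDed_cons_not_mem _ _ _ hc] at hy
      rcases List.mem_cons.mp hy with hy | hy
      · exact hy ▸ List.mem_cons_self ..
      · exact List.mem_cons_of_mem _ (ih _ hy)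

-- a kept entry's version was not in the seen-set it was kept under
lemma pvDed_ver_not_seen (l : List (List (String × String))) (seen : PySem.Set String)
    (y : List (String × String)) (hy : y ∈ pvDed l seen) : pvGetVer y "" ∉ seen := by
  induction l generalizing seen with
  | nil => simp [pvDed] at hy
  | cons e t ih =>
    by_cases hc : pvGetVer e "" ∈ seen
    · rw [pvDed_cons_mem _ _ _ hc] at hy
      exact ih _ hy
    · rw [pvDed_cons_not_mem _ _ _ hc] at hy
      rcases List.mem_cons.mp hy with hy | hy
      · exact hy ▸ hc
      · intro hmem
        exact ih _ hy ((PySem.Set.mem_add _ _ _).mpr (Or.inl hmem))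

-- dedup commutes with removing one version wholesale
lemma pvDed_filter_ver (l : List (List (String × String))) (seen : PySem.Set String) (v : String) :
    pvDed (l.filter (fun e => pvGetVer e "" ≠ v)) seen
      = (pvDed l seen).filter (fun e => pvGetVer e "" ≠ v) := by
  induction l generalizing seen with
  | nil => simp [pvDed]
  | cons e t ih =>
    by_cases hv : pvGetVer e "" = v
    · rw [List.filter_cons_of_neg (by simp [hv])]
      by_cases hc : pvGetVer e "" ∈ seen
      · rw [pvDed_cons_mem _ _ _ hc, ih]
      · rw [pvDed_cons_not_mem _ _ _ hc, List.filter_cons_of_neg (by simp [hv]), ← ih]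
        refine pvDed_congr _ _ _ (fun e' he' => ?_)
        have hne : pvGetVer e' "" ≠ v := by
          have := List.of_mem_filter he'
          simpa using this
        rw [PySem.Set.mem_add]
        constructor
        · exact fun h => Or.inl h
        · intro h
          rcases h with h | h
          · exact h
          · exact absurd (h.trans hv) hne
    · rw [List.filter_cons_of_pos (by simp [hv])]
      by_cases hc : pvGetVer e "" ∈ seen
      · rw [pvDed_cons_mem _ _ _ hc, pvDed_cons_mem _ _ _ hc, ih]
      · rw [pvDed_cons_not_mem _ _ _ hc, pvDed_cons_not_mem _ _ _ hc,
          List.filter_cons_of_pos (by simp [hv]), ih]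

-- snoc characterisation of the stable descending insertion sort
lemma pvSort_snoc (l : List (List (String × String))) (x : List (String × String)) :
    PySem.List.sorted (l ++ [x]) pvKey true
      = PySem.List.insertBy pvBefore x (PySem.List.sorted l pvKey true) := by
  rw [PySem.List.sorted_rev_eq_foldl_insertBy, PySem.List.sorted_rev_eq_foldl_insertBy,
    List.foldl_append]
  rfl

-- extraction of a first-maximal element from the stable descending sort
lemma pvSort_extract (a b : List (List (String × String))) (x : List (String × String))
    (ha : ∀ y ∈ a, pvKey y < pvKey x) (hb : ∀ y ∈ b, ¬ pvKey x < pvKey y) :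
    PySem.List.sorted (a ++ x :: b) pvKey true
      = x :: PySem.List.sorted (a ++ b) pvKey true := by
  induction b using List.reverseRecOn with
  | nil =>
    have h1 : a ++ x :: ([] : List (List (String × String))) = a ++ [x] := rfl
    rw [h1, pvSort_snoc, List.append_nil]
    cases hs : PySem.List.sorted a pvKey true with
    | nil => rfl
    | cons z t =>
      have hz : z ∈ a := (PySem.List.mem_sorted ..).mp (hs ▸ List.mem_cons_self ..)
      exact pvInsertBy_cons_true _ _ _ _ (decide_eq_true (ha z hz))
  | append_singleton b' y ih =>
    have hb' : ∀ z ∈ b', ¬ pvKey x < pvKey z := fun z hz => hb z (by simp [hz])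
    have hy : ¬ pvKey x < pvKey y := hb y (by simp)
    have h1 : a ++ x :: (b' ++ [y]) = (a ++ x :: b') ++ [y] := by simp
    have h2 : a ++ (b' ++ [y]) = (a ++ b') ++ [y] := by simp
    rw [h1, h2, pvSort_snoc, pvSort_snoc, ih hb',
      pvInsertBy_cons_false _ _ _ _ (by simpa [pvBefore] using hy)]

-- max(entries, key=key) of a nonempty list exists
lemma pvMax_cons_isSome (t : List (List (String × String))) :
    ∀ c, (PySem.List.max? (c :: t) pvKey).isSome := by
  induction t with
  | nil => intro c; simp [PySem.List.max?]
  | cons x t ih =>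
    intro c
    rw [pvMax_cons_cons]
    exact ih _

-- max? returns the FIRST maximal element: everything before it is strictly below it,
-- and nothing in the list is strictly above it
lemma pvMaxFold_decomp (t : List (List (String × String))) :
    ∀ (c r : List (String × String)), PySem.List.max? (c :: t) pvKey = some r →
    (∀ y ∈ c :: t, ¬ pvKey r < pvKey y) ∧
      (r = c ∨ ∃ a b, t = a ++ r :: b ∧ pvKey c < pvKey r ∧ ∀ y ∈ a, pvKey y < pvKey r) := by
  induction t with
  | nil =>
    intro c r h
    simp [PySem.List.max?] at h
    subst h
    exact ⟨by simp, Or.inl rfl⟩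
  | cons x t ih =>
    intro c r h
    rw [pvMax_cons_cons] at h
    by_cases hx : pvKey c < pvKey x
    · rw [if_pos hx] at h
      rcases ih x r h with ⟨hglob, hdisj⟩
      have hrx : ¬ pvKey r < pvKey x := hglob x (List.mem_cons_self ..)
      refine ⟨?_, ?_⟩
      · intro y hy
        rcases List.mem_cons.mp hy with hy | hy
        · subst hy
          intro hrc
          exact hrx (lt_trans hrc hx)
        · exact hglob y hy
      · rcases hdisj with hr | ⟨a, b, ht, hlt, ha⟩
        · exact Or.inr ⟨[], t, by simp [hr], hr ▸ hx, by simp⟩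
        · refine Or.inr ⟨x :: a, b, by simp [ht], lt_trans hx hlt, ?_⟩
          intro y hy
          rcases List.mem_cons.mp hy with hy | hy
          · exact hy ▸ hlt
          · exact ha y hy
    · rw [if_neg hx] at h
      rcases ih c r h with ⟨hglob, hdisj⟩
      have hrc : ¬ pvKey r < pvKey c := hglob c (List.mem_cons_self ..)
      refine ⟨?_, ?_⟩
      · intro y hy
        rcases List.mem_cons.mp hy with hy | hy
        · exact hy ▸ hrc
        · rcases List.mem_cons.mp hy with hy | hy
          · subst hy
            intro hry
            exact hrc (lt_of_lt_of_le hry (Std.not_lt.mp hx))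
          · exact hglob y (List.mem_cons_of_mem _ hy)
      · rcases hdisj with hr | ⟨a, b, ht, hlt, ha⟩
        · exact Or.inl hr
        · refine Or.inr ⟨x :: a, b, by simp [ht], hlt, ?_⟩
          intro y hy
          rcases List.mem_cons.mp hy with hy | hy
          · exact hy ▸ lt_of_le_of_lt (Std.not_lt.mp hx) hlt
          · exact ha y hy

-- max? decomposition: l = a ++ m :: b with everything in a strictly below m
lemma pvMax_decomp (l : List (List (String × String))) (m : List (String × String))
    (h : PySem.List.max? l pvKey = some m) :
    ∃ a b, l = a ++ m :: b ∧ (∀ y ∈ a, pvKey y < pvKey m) ∧ ∀ y ∈ l, ¬ pvKey m < pvKey y := by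
  cases l with
  | nil => simp [PySem.List.max?] at h
  | cons x t =>
    rcases pvMaxFold_decomp t x m h with ⟨hglob, hdisj⟩
    rcases hdisj with hr | ⟨a, b, ht, hlt, ha⟩
    · exact ⟨[], t, by simp [hr], by simp, hglob⟩
    · refine ⟨x :: a, b, by simp [ht], ?_, hglob⟩
      intro y hy
      rcases List.mem_cons.mp hy with hy | hy
      · exact hy ▸ hlt
      · exact ha y hy

-- main lemma: B's selection loop computes the stable descending sort of the keep-first dedup
lemma pvSelLoop_eq_aux (n : Nat) : ∀ (m : List (List (String × String))), m.length ≤ n →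
    (∀ e ∈ m, pvGetVer e "" ≠ "") →
    pvSelLoop m = PySem.List.sorted (pvDed m PySem.Set.empty) pvKey true := by
  induction n with
  | zero =>
    intro m hlen _
    cases m with
    | nil => rw [pvSelLoop]; rfl
    | cons x t => simp at hlen
  | succ n ih =>
    intro m hlen hne
    cases hm : PySem.List.max? m pvKey with
    | none =>
      cases m with
      | nil => rw [pvSelLoop]; rfl
      | cons x t =>
        have := pvMax_cons_isSome t x
        rw [hm] at this
        simp at this
    | some best =>
      rcases pvMax_decomp m best hm with ⟨a, b, hdec, hlta, hmax⟩
      have hbm : best ∈ m := by rw [hdec]; exact List.mem_append.mpr (Or.inr (List.mem_cons_self ..))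
      have hvb : pvGetVer best "" ≠ "" := hne best hbm
      -- no entry of a carries best's version (same version would force an equal key)
      have hva : ∀ y ∈ a, pvGetVer y "" ≠ pvGetVer best "" := by
        intro y hy hv
        have hyn : pvGetVer y "" ≠ "" := hne y (hdec ▸ by simp [hy])
        exact absurd (pvKey_congr y best hyn hv hvb ▸ hlta y hy) (lt_irrefl _)
      have hnv : pvGetVer best "" ∉ pvVset a PySem.Set.empty := by
        rw [mem_pvVset]
        rintro (h | h)
        · simp [PySem.Set.empty] at h
        · rcases List.mem_map.mp h with ⟨y, hy, hv⟩
          exact hva y hy hv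
      -- decompose the dedup of m around best
      have hded : pvDed m PySem.Set.empty
          = pvDed a PySem.Set.empty
            ++ best :: pvDed b (PySem.Set.add (pvVset a PySem.Set.empty) (pvGetVer best "")) := by
        rw [hdec, pvDed_append, pvDed_cons_not_mem _ _ _ hnv]
      -- the filtered list's dedup is the same without best
      have hdedf : pvDed (m.filter (fun e => pvGetVer e "" ≠ pvGetVer best "")) PySem.Set.empty
          = pvDed a PySem.Set.empty
            ++ pvDed b (PySem.Set.add (pvVset a PySem.Set.empty) (pvGetVer best "")) := by
        rw [pvDed_filter_ver, hded, List.filter_append, List.filter_cons_of_neg (by simp),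
          List.filter_eq_self.mpr, List.filter_eq_self.mpr]
        · intro y hy
          have := pvDed_ver_not_seen _ _ _ hy
          simp only [decide_eq_true_eq]
          intro hv
          exact this ((PySem.Set.mem_add _ _ _).mpr (Or.inr hv))
        · intro y hy
          simpa using hva y (mem_pvDed _ _ _ hy)
      have hlen' : (m.filter (fun e => pvGetVer e "" ≠ pvGetVer best "")).length ≤ n :=
        Nat.lt_succ_iff.mp (Nat.lt_of_lt_of_le (pvSelDec m best hm) hlen)
      have hne' : ∀ e ∈ m.filter (fun e => pvGetVer e "" ≠ pvGetVer best ""),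
          pvGetVer e "" ≠ "" := fun e he => hne e (List.mem_of_mem_filter he)
      have hs : (PySem.List.max? m pvKey).isSome := by rw [hm]; rfl
      have hg : (PySem.List.max? m pvKey).get hs = best := by simp [hm]
      rw [pvSelLoop, dif_pos hs]
      simp only [hg]
      rw [ih _ hlen' hne', hded, hdedf]
      refine (pvSort_extract _ _ _ ?_ ?_).symm
      · intro y hy
        exact hlta y (mem_pvDed _ _ _ hy)
      · intro y hy
        exact hmax y (hdec ▸ by simp [mem_pvDed _ _ _ hy])

lemma pvSelLoop_eq (m : List (List (String × String))) (hne : ∀ e ∈ m, pvGetVer e "" ≠ "") :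
    pvSelLoop m = PySem.List.sorted (pvDed m PySem.Set.empty) pvKey true :=
  pvSelLoop_eq_aux m.length m (Nat.le_refl _) hne

-- A's dict loop produces exactly the keep-first dedup of the version-bearing entries
lemma pvAfold (l : List (List (String × String))) (d : PySem.Dict String (List (String × String))) :
    (l.foldl
      (fun seen entry =>
        if pvGetVer entry "" ≠ "" ∧ seen.contains (pvGetVer entry "") = false
        then seen.insert (pvGetVer entry "") entry else seen) d).values
    = d.values ++ pvDed (l.filter (fun e => pvGetVer e "" ≠ "")) d.keys := by
  induction l generalizing d with
  | nil => simp [pvDed]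
  | cons e t ih =>
    by_cases hv : pvGetVer e "" = ""
    · simp only [List.foldl_cons, List.filter_cons]
      rw [if_neg (by simp [hv]), if_neg (by simp [hv])]
      exact ih d
    · by_cases hc : d.contains (pvGetVer e "") = true
      · have hck : pvGetVer e "" ∈ d.keys := (PySem.Dict.contains_iff_mem_keys d _).mp hc
        simp only [List.foldl_cons, List.filter_cons]
        rw [if_neg (by simp [hv, hc]), if_pos (by simp [hv]), pvDed_cons_mem _ _ _ hck]
        exact ih d
      · simp only [Bool.not_eq_true] at hc
        have hnk : pvGetVer e "" ∉ d.keys :=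
          fun h => by simp [(PySem.Dict.contains_iff_mem_keys d _).mpr h] at hc
        simp only [List.foldl_cons, List.filter_cons]
        rw [if_pos (by simp [hv, hc]), if_pos (by simp [hv]), pvDed_cons_not_mem _ _ _ hnk]
        rw [ih]
        have hvals : (d.insert (pvGetVer e "") e).values = d.values ++ [e] := by
          simp [PySem.Dict.values, PySem.Dict.items_insert_of_not_contains d e hc]
        have hkeys : (d.insert (pvGetVer e "") e).keys = d.keys ++ [pvGetVer e ""] :=
          PySem.Dict.keys_insert_of_not_contains d e hc
        rw [hvals, hkeys, pvAdd_of_not_mem _ _ hnk, List.append_assoc]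
        rfl

-- ===== VERDICT (by name: the statement is the Claim_ definition above) =====
theorem merge_changelogs_spec : Claim_equal_merge_changelogs := by
  intro bundled remote _ _
  unfold Spec_merge_changelogs merge_changelogs merge_changelogs_alt
  rw [pvAfold]
  have hvals : (PySem.Dict.empty : PySem.Dict String (List (String × String))).values = [] := rfl
  have hkeys : (PySem.Dict.empty : PySem.Dict String (List (String × String))).keys = [] := rfl
  rw [hvals, hkeys]
  rw [pvSelLoop_eq]
  · rfl
  · intro e he
    simpa using List.of_mem_filter he
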